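-- pv_equiv track=rewrite | github.com/John75SunCity/ssh-git-github.com-odoo-odoo.git-18.0 | admin-tools/development-tools/odoo_comprehensive_syntax_fixer.py | fix_indentation_issues
-- ===== SOURCE A (Python) =====
-- def fix_indentation_issues(content):
--     """Fix basic indentation issues"""
--     lines = content.split('\n')
--     fixed_lines = []
--
--     for line in lines:
--         # Fix unexpected indents after class or def
--         if line.strip().startswith('class ') or line.strip().startswith('def '):
--             # Ensure proper indentation level
--             indent_level = len(line) - len(line.lstrip())
--             if indent_level > 0 and not line.lstrip().startswith('@'):
--                 line = line.lstrip()  # Remove unexpected indent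
--
--         fixed_lines.append(line)
--
--     return '\n'.join(fixed_lines)
-- ===== SOURCE B (Python) =====
-- def fix_indentation_issues(content):
--     """Fix basic indentation issues"""
--     # Single index-based scan over the raw string: at each line start skip the
--     # whitespace run, cut the line at the next newline, and emit either the
--     # dedented body or the untouched segment -- no split()/lstrip() per line.
--     out = []
--     i, n = 0, len(content)
--     while i <= n:
--         j = i
--         while j < n and content[j] in ' \t\r\x0b\x0c':
--             j += 1
--         k = content.find('\n', j)
--         if k < 0:
--             k = n
--         body = content[j:k]
--         stripped = body.rstrip()
--         if j > i and (stripped.startswith('class ') or stripped.startswith('def ')):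
--             out.append(body)
--         else:
--             out.append(content[i:k])
--         if k < n:
--             out.append('\n')
--         i = k + 1
--     return ''.join(out)
-- ===== Notes on version B (the rewrite author's own statement) =====
-- stated objective: alternative
-- what changed: Replaces the split-into-lines / per-line strip-lstrip loop / join pipeline with a single index-based scan over the raw string that skips each line's whitespace run, cuts at the next newline with find, and emits either the dedented body or the untouched segment.
import Mathlib
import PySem

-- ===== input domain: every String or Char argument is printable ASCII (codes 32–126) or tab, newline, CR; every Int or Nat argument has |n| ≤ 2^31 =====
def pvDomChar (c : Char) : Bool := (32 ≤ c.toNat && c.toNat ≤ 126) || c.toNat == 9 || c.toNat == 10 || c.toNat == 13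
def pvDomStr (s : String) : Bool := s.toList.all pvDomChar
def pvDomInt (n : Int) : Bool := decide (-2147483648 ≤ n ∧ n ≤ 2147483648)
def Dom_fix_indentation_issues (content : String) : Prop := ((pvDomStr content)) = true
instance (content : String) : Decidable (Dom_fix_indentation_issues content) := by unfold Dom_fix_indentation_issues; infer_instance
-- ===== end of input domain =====

-- B replaces A's split-into-lines / per-line strip-lstrip loop / join pipeline by a single
-- index-style scan over the raw character stream (alternative decomposition, same cost).


-- ===== PORT A =====
-- per-line body of A's for-loop: dedent a line whose stripped text starts with 'class ' / 'def '
def pvFixLineA (line : List Char) : List Char :=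
  if PySem.Chars.startswith (PySem.Chars.strip line) "class ".toList = true
      ∨ PySem.Chars.startswith (PySem.Chars.strip line) "def ".toList = true then
    let indent_level : Nat := line.length - (PySem.Chars.lstrip line).length
    if 0 < indent_level ∧ ¬ PySem.Chars.startswith (PySem.Chars.lstrip line) "@".toList = true then
      PySem.Chars.lstrip line
    else line
  else line

def fix_indentation_issues (content : String) : String :=
  let lines := PySem.Chars.splitOn content.toList ['\n']
  let fixed_lines := lines.foldl (fun acc line => acc ++ [pvFixLineA line]) ([] : List (List Char))
  String.mk (PySem.Chars.join ['\n'] fixed_lines)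

-- ===== PORT B =====
-- the whitespace characters Source B's scanner skips at a line start (`content[j] in ' \t\r\x0b\x0c'`)
def pvWsB : List Char := [' ', '\t', '\r', '\x0b', '\x0c']

-- Source B's header test: `body.rstrip()` starts with 'class ' or 'def '
def pvHeaderB (body : List Char) : Bool :=
  let stripped := PySem.Chars.rstrip body
  PySem.Chars.startswith stripped "class ".toList || PySem.Chars.startswith stripped "def ".toList

-- Source B's while-loop over the raw stream: skip the ws run, cut at the next newline, emit a piece
def pvFixBgo (cs : List Char) : List Char :=
  let ws := cs.takeWhile (fun c => pvWsB.contains c)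
  let rest := cs.dropWhile (fun c => pvWsB.contains c)
  let body := rest.takeWhile (fun c => c != '\n')
  let piece := if 0 < ws.length ∧ pvHeaderB body = true then body else ws ++ body
  match h : rest.dropWhile (fun c => c != '\n') with
  | [] => piece
  | _ :: t => piece ++ '\n' :: pvFixBgo t
termination_by cs.length
decreasing_by
  have h1 : ((cs.dropWhile (fun c => pvWsB.contains c)).dropWhile (fun c => c != '\n')).length ≤ cs.length :=
    le_trans (List.length_dropWhile_le _ _) (List.length_dropWhile_le _ _)
  rw [h] at h1
  simp at h1
  omega

def fix_indentation_issues_alt (content : String) : String := String.mk (pvFixBgo content.toList)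

-- ===== PRECONDITION & SPEC =====
def Spec_fix_indentation_issues (content : String) (out : String) : Prop := out = fix_indentation_issues_alt content
instance (content : String) (out : String) : Decidable (Spec_fix_indentation_issues content out) := by unfold Spec_fix_indentation_issues; infer_instance

-- ===== CLAIM (what is proved, stated in full; the proofs are below) =====
def Claim_equal_fix_indentation_issues : Prop := ∀ (content : String), Dom_fix_indentation_issues content → Spec_fix_indentation_issues content (fix_indentation_issues content)

-- ===== LEMMAS AND PROOFS =====

-- reference line splitter: what Python's content.split('\n') produces, in recursive form
def pvLinesRef (cs : List Char) : List (List Char) :=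
  match h : cs.dropWhile (fun c => c != '\n') with
  | [] => [cs.takeWhile (fun c => c != '\n')]
  | _ :: t => cs.takeWhile (fun c => c != '\n') :: pvLinesRef t
termination_by cs.length
decreasing_by
  have h1 : (cs.dropWhile (fun c => c != '\n')).length ≤ cs.length := List.length_dropWhile_le _ _
  rw [h] at h1
  simp at h1
  omega

def pvConsHead (p : List Char) : List (List Char) → List (List Char)
  | [] => [p]
  | x :: xs => (p ++ x) :: xs

theorem pvLinesRef_nil_case (cs : List Char) (h : cs.dropWhile (fun c => c != '\n') = []) :
    pvLinesRef cs = [cs.takeWhile (fun c => c != '\n')] := by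
  rw [pvLinesRef]
  split
  · rfl
  · rename_i heq
    rw [h] at heq
    cases heq

theorem pvLinesRef_cons_case (cs t : List Char) (c : Char)
    (h : cs.dropWhile (fun c => c != '\n') = c :: t) :
    pvLinesRef cs = cs.takeWhile (fun c => c != '\n') :: pvLinesRef t := by
  rw [pvLinesRef]
  split
  · rename_i heq
    rw [h] at heq
    cases heq
  · rename_i c' t' heq
    rw [h] at heq
    cases heq
    rfl

theorem pvLinesRef_ne_nil (cs : List Char) : pvLinesRef cs ≠ [] := by
  rw [pvLinesRef]
  split <;> simp

theorem pvConsHead_nil_ref (cs : List Char) : pvConsHead [] (pvLinesRef cs) = pvLinesRef cs := by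
  cases h : pvLinesRef cs with
  | nil => exact absurd h (pvLinesRef_ne_nil cs)
  | cons x xs => simp [pvConsHead]

theorem pvHeadDrop {p : Char → Bool} {l t : List Char} {c : Char}
    (h : l.dropWhile p = c :: t) : p c = false := by
  induction l with
  | nil => simp at h
  | cons a l ih =>
    rw [List.dropWhile_cons] at h
    split at h
    · exact ih h
    · rename_i hp
      cases h
      simpa using hp

theorem pvSplitGo (fuel : Nat) : ∀ (l cur : List Char) (acc : List (List Char)), l.length < fuel →
    PySem.Chars.splitOn.go ['\n'] fuel l cur acc = acc.reverse ++ pvConsHead cur.reverse (pvLinesRef l) := by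
  induction fuel with
  | zero => intro l cur acc h; omega
  | succ fuel ih =>
    intro l cur acc h
    match l with
    | [] =>
      rw [PySem.Chars.splitOn.go.eq_def, pvLinesRef]
      simp [pvConsHead]
    | c :: rest =>
      rw [PySem.Chars.splitOn.go.eq_def]
      by_cases hc : c = '\n'
      · subst hc
        simp only [List.isPrefixOf, Bool.and_true, beq_self_eq_true, if_pos, List.drop_succ_cons,
          List.drop_zero, List.length_cons, List.length_nil]
        rw [ih rest [] (cur.reverse :: acc) (by simp at h ⊢; omega)]
        have hlr : pvLinesRef ('\n' :: rest) = [] :: pvLinesRef rest := by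
          rw [pvLinesRef_cons_case ('\n' :: rest) rest '\n' (by simp)]
          simp
        rw [hlr, List.reverse_nil, pvConsHead_nil_ref]
        simp [pvConsHead]
      · have hpre : (['\n'].isPrefixOf (c :: rest)) = false := by
          simp [List.isPrefixOf]
          exact fun hh => absurd hh.symm hc
        simp only [hpre, Bool.false_eq_true, if_false]
        rw [ih rest (c :: cur) acc (by simp at h ⊢; omega)]
        have hnlc : (c != '\n') = true := by simpa using hc
        have hshape : ∀ xs, pvConsHead (cur.reverse ++ [c]) xs = pvConsHead cur.reverse (pvConsHead [c] xs) := by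
          intro xs
          cases xs <;> simp [pvConsHead]
        have hcons : pvLinesRef (c :: rest) = pvConsHead [c] (pvLinesRef rest) := by
          cases hdrop : rest.dropWhile (fun c => c != '\n') with
          | nil =>
            rw [pvLinesRef_nil_case _ (by simp [List.dropWhile_cons, hnlc, hdrop]),
              pvLinesRef_nil_case _ hdrop]
            simp [pvConsHead, List.takeWhile_cons, hnlc]
          | cons d t =>
            rw [pvLinesRef_cons_case _ t d (by simp [List.dropWhile_cons, hnlc, hdrop]),
              pvLinesRef_cons_case _ t d hdrop]
            simp [pvConsHead, List.takeWhile_cons, hnlc]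
        rw [List.reverse_cons, hshape, hcons]

theorem pvSplitOn_eq (cs : List Char) : PySem.Chars.splitOn cs ['\n'] = pvLinesRef cs := by
  rw [PySem.Chars.splitOn, pvSplitGo (cs.length + 1) cs [] [] (by omega)]
  simp [pvConsHead_nil_ref]
theorem pvTw_sub {p q : Char → Bool} (hpq : ∀ c, p c = true → q c = true) (cs : List Char) :
    cs.takeWhile p = (cs.takeWhile q).takeWhile p
      ∧ cs.dropWhile p = (cs.takeWhile q).dropWhile p ++ cs.dropWhile q := by
  induction cs with
  | nil => simp
  | cons c t ih =>
    by_cases hp : p c = true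
    · have hq := hpq c hp
      simp [List.takeWhile_cons, List.dropWhile_cons, hp, hq, ih.1, ← ih.2]
    · by_cases hq : q c = true
      · simp [List.takeWhile_cons, List.dropWhile_cons, hp, hq]
      · simp [List.takeWhile_cons, List.dropWhile_cons, hp, hq]

theorem pvCongrTD {p q : Char → Bool} (cs : List Char) (h : ∀ c ∈ cs, p c = q c) :
    cs.takeWhile p = cs.takeWhile q ∧ cs.dropWhile p = cs.dropWhile q := by
  induction cs with
  | nil => simp
  | cons c t ih =>
    have hc := h c (List.mem_cons_self)
    have iht := ih (fun x hx => h x (List.mem_cons_of_mem c hx))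
    by_cases hp : p c = true
    · simp [List.takeWhile_cons, List.dropWhile_cons, hp, ← hc, iht.1, iht.2]
    · simp [List.takeWhile_cons, List.dropWhile_cons, hp, ← hc]

-- on domain characters other than '\n', Python's str whitespace is exactly Source B's scan set
theorem pvWsChar (c : Char) (hd : pvDomChar c = true) (hn : (c != '\n') = true) :
    PySem.Chars.isspace c = pvWsB.contains c := by
  have hbeq : ∀ d : Char, c = d ↔ c.toNat = d.toNat :=
    fun d => ⟨fun h => h ▸ rfl, fun h => Char.ext (UInt32.toNat_inj.mp h)⟩
  have hn' : c.toNat ≠ 10 := by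
    intro h
    rw [bne_iff_ne] at hn
    exact hn (Char.ext (UInt32.toNat_inj.mp h))
  rw [Bool.eq_iff_iff]
  simp only [pvDomChar, Bool.or_eq_true, Bool.and_eq_true, decide_eq_true_eq, beq_iff_eq] at hd
  simp only [PySem.Chars.isspace, pvWsB, List.contains_eq_mem, List.mem_cons, List.not_mem_nil,
    or_false, Bool.or_eq_true, Bool.and_eq_true, decide_eq_true_eq, hbeq,
    (by decide : (' ' : Char).toNat = 32), (by decide : ('\t' : Char).toNat = 9),
    (by decide : ('\r' : Char).toNat = 13), (by decide : ('\x0b' : Char).toNat = 11),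
    (by decide : ('\x0c' : Char).toNat = 12)]
  omega

theorem pvWsB_ne_nl : ∀ c : Char, (pvWsB.contains c) = true → (c != '\n') = true := by
  intro c h
  simp [pvWsB] at h
  rcases h with h | h | h | h | h <;> subst h <;> decide

theorem pvRstripPrefix (l : List Char) : PySem.Chars.rstrip l <+: l := by
  have h := List.dropWhile_suffix (l := l.reverse) PySem.Chars.isspace
  have h2 : (List.dropWhile PySem.Chars.isspace l.reverse).reverse <+: l.reverse.reverse :=
    List.reverse_prefix.mpr h
  simpa [PySem.Chars.rstrip] using h2

-- the body of A's loop equals the piece Source B emits, on a newline-free domain line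
theorem pvLineA (line : List Char) (hdom : ∀ c ∈ line, pvDomChar c = true)
    (hnl : ∀ c ∈ line, (c != '\n') = true) :
    pvFixLineA line =
      if 0 < (line.takeWhile (fun c => pvWsB.contains c)).length ∧
          pvHeaderB (line.dropWhile (fun c => pvWsB.contains c)) = true
      then line.dropWhile (fun c => pvWsB.contains c)
      else line.takeWhile (fun c => pvWsB.contains c) ++ line.dropWhile (fun c => pvWsB.contains c) := by
  have hls : PySem.Chars.lstrip line = line.dropWhile (fun c => pvWsB.contains c) := by
    have h := (pvCongrTD (p := PySem.Chars.isspace) (q := fun c => pvWsB.contains c) line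
      (fun c hc => pvWsChar c (hdom c hc) (hnl c hc))).2
    simpa [PySem.Chars.lstrip] using h
  have htd : line.takeWhile (fun c => pvWsB.contains c) ++ line.dropWhile (fun c => pvWsB.contains c) = line :=
    List.takeWhile_append_dropWhile
  have hlen : (line.takeWhile (fun c => pvWsB.contains c)).length
      + (line.dropWhile (fun c => pvWsB.contains c)).length = line.length := by
    rw [← List.length_append, htd]
  simp only [pvFixLineA, PySem.Chars.strip, hls]
  by_cases hcond : pvHeaderB (line.dropWhile (fun c => pvWsB.contains c)) = true
  · have hor : PySem.Chars.startswith (PySem.Chars.rstrip (line.dropWhile (fun c => pvWsB.contains c))) "class ".toList = true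
        ∨ PySem.Chars.startswith (PySem.Chars.rstrip (line.dropWhile (fun c => pvWsB.contains c))) "def ".toList = true := by
      simpa [pvHeaderB, Bool.or_eq_true] using hcond
    have hhead : ∃ d t', line.dropWhile (fun c => pvWsB.contains c) = d :: t' ∧ (d = 'c' ∨ d = 'd') := by
      have hpre : PySem.Chars.rstrip (line.dropWhile (fun c => pvWsB.contains c)) <+: line.dropWhile (fun c => pvWsB.contains c) :=
        pvRstripPrefix _
      rcases hor with hsw | hsw
      · have h1 : "class ".toList <+: PySem.Chars.rstrip (line.dropWhile (fun c => pvWsB.contains c)) :=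
          List.isPrefixOf_iff_prefix.mp (by simpa [PySem.Chars.startswith] using hsw)
        obtain ⟨u, hu⟩ := h1.trans hpre
        rw [(by decide : "class ".toList = ['c', 'l', 'a', 's', 's', ' '])] at hu
        exact ⟨'c', _, hu.symm, Or.inl rfl⟩
      · have h1 : "def ".toList <+: PySem.Chars.rstrip (line.dropWhile (fun c => pvWsB.contains c)) :=
          List.isPrefixOf_iff_prefix.mp (by simpa [PySem.Chars.startswith] using hsw)
        obtain ⟨u, hu⟩ := h1.trans hpre
        rw [(by decide : "def ".toList = ['d', 'e', 'f', ' '])] at hu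
        exact ⟨'d', _, hu.symm, Or.inr rfl⟩
    have hat : ¬ PySem.Chars.startswith (line.dropWhile (fun c => pvWsB.contains c)) "@".toList = true := by
      obtain ⟨d, t', ht', hd⟩ := hhead
      rw [ht', (by decide : "@".toList = ['@'])]
      rcases hd with h | h <;> subst h <;> simp [PySem.Chars.startswith, List.isPrefixOf]
    rw [if_pos hor]
    by_cases hw : 0 < (line.takeWhile (fun c => pvWsB.contains c)).length
    · rw [if_pos ⟨by omega, hat⟩, if_pos ⟨hw, hcond⟩]
    · rw [if_neg (by omega), if_neg (fun hcc => hw hcc.1), htd]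
  · have hor' : ¬ (PySem.Chars.startswith (PySem.Chars.rstrip (line.dropWhile (fun c => pvWsB.contains c))) "class ".toList = true
        ∨ PySem.Chars.startswith (PySem.Chars.rstrip (line.dropWhile (fun c => pvWsB.contains c))) "def ".toList = true) :=
      fun h => hcond (by simpa [pvHeaderB, Bool.or_eq_true] using h)
    rw [if_neg hor', if_neg (fun hcc => hcond hcc.2), htd]

theorem pvB_main (n : Nat) : ∀ (cs : List Char), cs.length ≤ n → (∀ c ∈ cs, pvDomChar c = true) →
    pvFixBgo cs = PySem.Chars.join ['\n'] ((pvLinesRef cs).map pvFixLineA) := by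
  induction n with
  | zero =>
    intro cs hlen hdom
    have hnil : cs = [] := by
      cases cs with
      | nil => rfl
      | cons c t => simp at hlen
    subst hnil
    rw [pvFixBgo, pvLinesRef_nil_case [] (by simp)]
    simp [PySem.Chars.join_singleton, pvFixLineA, PySem.Chars.strip, PySem.Chars.lstrip,
      PySem.Chars.rstrip, PySem.Chars.startswith, List.isPrefixOf, pvHeaderB]
  | succ n ih =>
    intro cs hlen hdom
    have h1 := (pvTw_sub pvWsB_ne_nl cs).1
    have h2 := (pvTw_sub pvWsB_ne_nl cs).2
    have hlineNl : ∀ x ∈ cs.takeWhile (fun c => c != '\n'), (x != '\n') = true :=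
      fun x hx => List.mem_takeWhile_imp (p := fun c => c != '\n') hx
    have hlineDom : ∀ x ∈ cs.takeWhile (fun c => c != '\n'), pvDomChar x = true :=
      fun x hx => hdom x ((List.takeWhile_sublist _).subset hx)
    have hbodyNl : ∀ x ∈ (cs.takeWhile (fun c => c != '\n')).dropWhile (fun c => pvWsB.contains c),
        (x != '\n') = true :=
      fun x hx => hlineNl x ((List.dropWhile_sublist _).subset hx)
    cases hdrop : cs.dropWhile (fun c => c != '\n') with
    | nil =>
      have hscrut : (cs.dropWhile (fun c => pvWsB.contains c)).dropWhile (fun c => c != '\n') = [] := by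
        rw [h2, hdrop, List.append_nil, List.dropWhile_eq_nil_iff.mpr hbodyNl]
      have hbody : (cs.dropWhile (fun c => pvWsB.contains c)).takeWhile (fun c => c != '\n')
          = (cs.takeWhile (fun c => c != '\n')).dropWhile (fun c => pvWsB.contains c) := by
        rw [h2, hdrop, List.append_nil, List.takeWhile_eq_self_iff.mpr hbodyNl]
      rw [pvFixBgo]
      split
      · rw [pvLinesRef_nil_case cs hdrop]
        simp only [List.map_cons, List.map_nil]
        rw [PySem.Chars.join_singleton, pvLineA _ hlineDom hlineNl, h1, hbody]
      · rename_i c' t' heq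
        rw [hscrut] at heq
        cases heq
    | cons c t =>
      have hcfalse : (c != '\n') = false := pvHeadDrop (p := fun c => c != '\n') hdrop
      have hX : List.dropWhile (fun c => c != '\n')
          ((cs.takeWhile (fun c => c != '\n')).dropWhile (fun c => pvWsB.contains c)) = [] :=
        List.dropWhile_eq_nil_iff.mpr hbodyNl
      have hXt : List.takeWhile (fun c => c != '\n')
          ((cs.takeWhile (fun c => c != '\n')).dropWhile (fun c => pvWsB.contains c))
          = (cs.takeWhile (fun c => c != '\n')).dropWhile (fun c => pvWsB.contains c) :=
        List.takeWhile_eq_self_iff.mpr hbodyNl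
      have hscrut : (cs.dropWhile (fun c => pvWsB.contains c)).dropWhile (fun c => c != '\n') = c :: t := by
        rw [h2, hdrop, List.dropWhile_append, hX]
        simp only [List.isEmpty_nil, if_true, List.dropWhile_cons, hcfalse, Bool.false_eq_true,
          if_false]
      have hbody : (cs.dropWhile (fun c => pvWsB.contains c)).takeWhile (fun c => c != '\n')
          = (cs.takeWhile (fun c => c != '\n')).dropWhile (fun c => pvWsB.contains c) := by
        rw [h2, hdrop, List.takeWhile_append, hXt, if_pos rfl]
        simp only [List.takeWhile_cons, hcfalse, Bool.false_eq_true, if_false, List.append_nil]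
      have hlent : t.length ≤ n := by
        have hld := List.length_dropWhile_le (fun c => c != '\n') cs
        rw [hdrop] at hld
        simp at hld
        omega
      have hdomt : ∀ x ∈ t, pvDomChar x = true := by
        intro x hx
        have hxm : x ∈ cs.dropWhile (fun c => c != '\n') := by
          rw [hdrop]
          exact List.mem_cons_of_mem c hx
        exact hdom x ((List.dropWhile_sublist _).subset hxm)
      rw [pvFixBgo]
      split
      · rename_i heq
        rw [hscrut] at heq
        cases heq
      · rename_i c' t' heq
        rw [hscrut] at heq
        cases heq
        rw [pvLinesRef_cons_case cs t c hdrop]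
        simp only [List.map_cons]
        cases hq : pvLinesRef t with
        | nil => exact absurd hq (pvLinesRef_ne_nil t)
        | cons q r =>
          rw [ih t hlent hdomt, hq]
          simp only [List.map_cons]
          rw [PySem.Chars.join_cons_cons]
          have h1' : cs.takeWhile (fun c => pvWsB.contains c)
              = (cs.takeWhile (fun c => c != '\n')).takeWhile (fun c => pvWsB.contains c) := h1
          rw [pvLineA _ hlineDom hlineNl, h1', hbody, List.append_assoc, List.singleton_append]

-- ===== VERDICT (by name: the statement is the Claim_ definition above) =====
theorem fix_indentation_issues_spec : Claim_equal_fix_indentation_issues := by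
  intro content hdom
  unfold Spec_fix_indentation_issues
  show fix_indentation_issues content = fix_indentation_issues_alt content
  simp only [fix_indentation_issues, fix_indentation_issues_alt]
  rw [pvSplitOn_eq, PySem.List.foldl_append_singleton_eq_map]
  simp only [List.nil_append]
  have hdom' : ∀ c ∈ content.toList, pvDomChar c = true := by
    have h : pvDomStr content = true := hdom
    unfold pvDomStr at h
    simpa [List.all_eq_true] using h
  rw [pvB_main content.toList.length content.toList le_rfl hdom']
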